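-- pv_equiv track=rewrite | github.com/datboi6942/family_boggle | backend/family_boggle/challenges.py | check_progress
-- ===== SOURCE A (Python) =====
-- from typing import Dict, List, Optional, Tuple
--
-- def check_progress(found_words: List[str], score: int) -> int:
--     vowels = set('AEIOU')
--     count = 0
--     for word in found_words:
--         w = word.upper()
--         consonant_streak = 0
--         max_streak = 0
--         for c in w:
--             if c not in vowels:
--                 consonant_streak += 1
--                 max_streak = max(max_streak, consonant_streak)
--             else:
--                 consonant_streak = 0
--         if max_streak >= 4:
--             count += 1
--     return count
-- ===== SOURCE B (Python) =====
-- def _has_run4(flags):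
--     # recursive sliding window: some 4 consecutive flags are all True
--     if len(flags) < 4:
--         return False
--     return (flags[0] and flags[1] and flags[2] and flags[3]) or _has_run4(flags[1:])
--
--
-- def check_progress(found_words, score):
--     return sum(1 for word in found_words
--                if _has_run4([c not in 'AEIOU' for c in word.upper()]))
-- ===== Notes on version B (the rewrite author's own statement) =====
-- stated objective: alternative
-- what changed: replaces the streak-counter/max-tracking state machine with a consonant-flag list and a recursive sliding-window test for four consecutive True flags
import Mathlib
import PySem

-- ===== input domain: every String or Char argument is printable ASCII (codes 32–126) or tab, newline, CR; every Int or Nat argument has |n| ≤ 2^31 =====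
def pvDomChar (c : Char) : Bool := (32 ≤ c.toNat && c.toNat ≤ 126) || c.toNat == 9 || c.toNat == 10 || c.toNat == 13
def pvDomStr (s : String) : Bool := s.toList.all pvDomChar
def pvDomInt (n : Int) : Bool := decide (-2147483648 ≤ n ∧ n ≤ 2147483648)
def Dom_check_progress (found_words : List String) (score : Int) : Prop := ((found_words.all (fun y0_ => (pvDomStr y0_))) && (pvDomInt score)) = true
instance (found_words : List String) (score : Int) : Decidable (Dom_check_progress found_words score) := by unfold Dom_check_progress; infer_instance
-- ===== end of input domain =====

-- B replaces A's streak-counter state machine with a consonant-flag list and a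
-- recursive sliding-window test for four consecutive consonants (alternative, same cost).


-- ===== PORT A =====
def check_progress (found_words : List String) (score : Int) : Int :=
  let vowels : PySem.Set Char := PySem.Set.ofList "AEIOU".toList
  found_words.foldl (fun count word =>
    let w := (PySem.Str.upper word).toList
    let st := w.foldl (fun (st : Int × Int) c =>
      if !(PySem.Set.contains vowels c) then (st.1 + 1, max st.2 (st.1 + 1)) else (0, st.2))
      (0, 0)
    if st.2 ≥ 4 then count + 1 else count) 0

-- ===== PORT B =====
-- recursive sliding window: some 4 consecutive flags are all true ('_ => false' = len(flags) < 4)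
def hasRun4 : List Bool → Bool
  | a :: b :: c :: d :: rest => (a && b && c && d) || hasRun4 (b :: c :: d :: rest)
  | _ => false

def check_progress_alt (found_words : List String) (score : Int) : Int :=
  found_words.foldl (fun count word =>
    if hasRun4 ((PySem.Str.upper word).toList.map (fun c => !("AEIOU".toList.contains c)))
    then count + 1 else count) 0

-- ===== PRECONDITION & SPEC =====
def Spec_check_progress (found_words : List String) (score : Int) (out : Int) : Prop := out = check_progress_alt found_words score
instance (found_words : List String) (score : Int) (out : Int) : Decidable (Spec_check_progress found_words score out) := by unfold Spec_check_progress; infer_instance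

-- ===== CLAIM (what is proved, stated in full; the proofs are below) =====
def Claim_equal_check_progress : Prop := ∀ (found_words : List String) (score : Int), Dom_check_progress found_words score → Spec_check_progress found_words score (check_progress found_words score)

-- ===== LEMMAS AND PROOFS =====
-- A's inner loop over consonant flags
def pvStep (st : Int × Int) (b : Bool) : Int × Int :=
  if b then (st.1 + 1, max st.2 (st.1 + 1)) else (0, st.2)

lemma hasRun4_replicate_true (j : Nat) (bs : List Bool) (h : 4 ≤ j) :
    hasRun4 (List.replicate j true ++ bs) = true := by
  obtain ⟨t, rfl⟩ : ∃ t, j = 4 + t := ⟨j - 4, by omega⟩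
  simp [List.replicate_add, List.replicate, hasRun4]

lemma hasRun4_cons_false (bs : List Bool) : hasRun4 (false :: bs) = hasRun4 bs := by
  match bs with
  | [] => rfl
  | [_] => rfl
  | [_, _] => rfl
  | b :: c :: d :: rest => simp [hasRun4]

lemma hasRun4_t1_false (bs : List Bool) : hasRun4 (true :: false :: bs) = hasRun4 bs := by
  match bs with
  | [] => rfl
  | [_] => rfl
  | c :: d :: rest => simp [hasRun4, hasRun4_cons_false]

lemma hasRun4_t2_false (bs : List Bool) : hasRun4 (true :: true :: false :: bs) = hasRun4 bs := by
  match bs with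
  | [] => rfl
  | d :: rest => simp [hasRun4, hasRun4_t1_false]

lemma hasRun4_t3_false (bs : List Bool) :
    hasRun4 (true :: true :: true :: false :: bs) = hasRun4 bs := by
  simp [hasRun4, hasRun4_t2_false]

lemma hasRun4_replicate_false (k : Nat) (bs : List Bool) (h : k ≤ 3) :
    hasRun4 (List.replicate k true ++ false :: bs) = hasRun4 bs := by
  interval_cases k
  · exact hasRun4_cons_false bs
  · exact hasRun4_t1_false bs
  · exact hasRun4_t2_false bs
  · exact hasRun4_t3_false bs

lemma hasRun4_replicate_short (k : Nat) (h : k ≤ 3) :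
    hasRun4 (List.replicate k true) = false := by
  interval_cases k <;> rfl

lemma pvStep_mono (bs : List Bool) : ∀ (s m : Int), m ≤ (bs.foldl pvStep (s, m)).2 := by
  induction bs with
  | nil => intro s m; simp
  | cons b bs ih =>
    intro s m
    cases b
    · simpa [pvStep] using ih 0 m
    · calc m ≤ max m (s + 1) := le_max_left _ _
        _ ≤ (bs.foldl pvStep (s + 1, max m (s + 1))).2 := ih _ _
        _ = (List.foldl pvStep (pvStep (s, m) true) bs).2 := by simp [pvStep]
        _ = _ := by simp [List.foldl]

lemma pvKey (bs : List Bool) : ∀ (k : Nat) (m : Int), (k : Int) ≤ m →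
    (4 ≤ (bs.foldl pvStep ((k : Int), m)).2 ↔
      4 ≤ m ∨ hasRun4 (List.replicate k true ++ bs) = true) := by
  induction bs with
  | nil =>
    intro k m hkm
    simp only [List.foldl_nil, List.append_nil]
    constructor
    · intro h; exact Or.inl h
    · rintro (h | h)
      · exact h
      · by_cases hk : 4 ≤ k
        · omega
        · rw [hasRun4_replicate_short k (by omega)] at h; exact absurd h (by simp)
  | cons b bs ih =>
    intro k m hkm
    cases b
    · -- vowel: streak resets
      by_cases hk : k ≤ 3
      · rw [show (List.foldl pvStep ((k : Int), m) (false :: bs)) = bs.foldl pvStep ((0 : Nat), m) by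
            simp [pvStep, List.foldl],
          hasRun4_replicate_false k bs hk]
        exact ih 0 m (by omega)
      · have h4m : (4 : Int) ≤ m := by omega
        have hfold : List.foldl pvStep ((k : Int), m) (false :: bs) = bs.foldl pvStep (0, m) := by
          simp [List.foldl, pvStep]
        constructor
        · intro _; exact Or.inl h4m
        · intro _
          rw [hfold]
          exact le_trans h4m (pvStep_mono bs 0 m)
    · -- consonant: streak extends
      have step1 : List.foldl pvStep ((k : Int), m) (true :: bs)
          = bs.foldl pvStep (((k + 1 : Nat) : Int), max m ((k + 1 : Nat) : Int)) := by
        simp [List.foldl, pvStep]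
      have rep1 : List.replicate k true ++ true :: bs = List.replicate (k + 1) true ++ bs := by
        rw [List.replicate_succ']
        simp
      rw [step1, rep1, ih (k + 1) (max m ((k + 1 : Nat) : Int)) (le_max_right _ _)]
      constructor
      · rintro (h | h)
        · rcases le_or_gt 4 m with hm | hm
          · exact Or.inl hm
          · refine Or.inr (hasRun4_replicate_true _ _ ?_)
            have : (4 : Int) ≤ ((k + 1 : Nat) : Int) := by
              rcases max_cases m ((k + 1 : Nat) : Int) with ⟨he, _⟩ | ⟨he, _⟩ <;> omega
            exact_mod_cast this
        · exact Or.inr h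
      · rintro (h | h)
        · exact Or.inl (le_max_of_le_left h)
        · exact Or.inr h

lemma pvWord (cs : List Char) :
    ((cs.foldl (fun (st : Int × Int) c =>
      if !(PySem.Set.contains (PySem.Set.ofList "AEIOU".toList) c)
      then (st.1 + 1, max st.2 (st.1 + 1)) else (0, st.2)) (0, 0)).2 ≥ 4)
    ↔ hasRun4 (cs.map (fun c => !("AEIOU".toList.contains c))) = true := by
  have hmap : (cs.map (fun c => !("AEIOU".toList.contains c))).foldl pvStep ((0 : Nat), (0 : Int))
      = cs.foldl (fun (st : Int × Int) c =>
          if !(PySem.Set.contains (PySem.Set.ofList "AEIOU".toList) c)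
          then (st.1 + 1, max st.2 (st.1 + 1)) else (0, st.2)) (0, 0) := by
    rw [List.foldl_map]; rfl
  have := pvKey (cs.map (fun c => !("AEIOU".toList.contains c))) 0 0 (by omega)
  rw [hmap] at this
  simp only [List.replicate, List.nil_append] at this
  constructor
  · intro h
    rcases this.mp h with h4 | h4
    · omega
    · exact h4
  · intro h; exact this.mpr (Or.inr h)

-- ===== VERDICT (by name: the statement is the Claim_ definition above) =====
theorem check_progress_spec : Claim_equal_check_progress := by
  intro found_words score _
  show check_progress found_words score = check_progress_alt found_words score
  dsimp only [check_progress, check_progress_alt]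
  refine PySem.List.foldl_congr_mem _ _ _ _ ?_
  intro acc
  intro word _
  exact if_congr (pvWord (PySem.Str.upper word).toList) rfl rfl
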